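-- pv_equiv track=rewrite | github.com/samarthya/ad688-scratch | src/data/data_cleaner.py | _extract_primary_education
-- ===== SOURCE A (Python) =====
-- from typing import Dict, List, Any, Optional, Tuple
--
-- def _extract_primary_education(education_list: List[str]) -> str:
--     """Extract the primary/highest education level from a list."""
--     if not education_list:
--         return 'No Education Listed'
--
--     # Education hierarchy (highest to lowest)
--     hierarchy = [
--         'Doctorate', 'PhD', 'Ph.D.', 'Doctor of Philosophy',
--         'Master', 'Master\'s', 'Master\'s degree',
--         'Bachelor', 'Bachelor\'s', 'Bachelor\'s degree',
--         'Associate', 'Associate\'s', 'Associate\'s degree',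
--         'High School', 'High school', 'High school diploma',
--         'No Education Listed', 'None'
--     ]
--
--     for level in hierarchy:
--         for edu in education_list:
--             if level.lower() in edu.lower():
--                 return level
--
--     return education_list[0]  # Return first if no hierarchy match
-- ===== SOURCE B (Python) =====
-- def _extract_primary_education(education_list):
--     """Extract the primary/highest education level from a list."""
--     if not education_list:
--         return 'No Education Listed'
--
--     hierarchy = [
--         'Doctorate', 'PhD', 'Ph.D.', 'Doctor of Philosophy',
--         'Master', 'Master\'s', 'Master\'s degree',
--         'Bachelor', 'Bachelor\'s', 'Bachelor\'s degree',
--         'Associate', 'Associate\'s', 'Associate\'s degree',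
--         'High School', 'High school', 'High school diploma',
--         'No Education Listed', 'None'
--     ]
--     lowered = [level.lower() for level in hierarchy]
--     n = len(hierarchy)
--
--     # One pass over the education list, keeping the minimum hierarchy rank seen.
--     best = n
--     for edu in education_list:
--         e = edu.lower()
--         r = next((i for i, lv in enumerate(lowered) if lv in e), n)
--         if r < best:
--             best = r
--
--     return hierarchy[best] if best < n else education_list[0]
-- ===== Notes on version B (the rewrite author's own statement) =====
-- stated objective: alternative
-- what changed: B replaces A's hierarchy-outer nested loop with early return by a single pass over education_list that maintains a minimum hierarchy-rank accumulator (per-item first-match index over a hierarchy lowered once up front), indexing back into hierarchy at the end.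
import Mathlib
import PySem

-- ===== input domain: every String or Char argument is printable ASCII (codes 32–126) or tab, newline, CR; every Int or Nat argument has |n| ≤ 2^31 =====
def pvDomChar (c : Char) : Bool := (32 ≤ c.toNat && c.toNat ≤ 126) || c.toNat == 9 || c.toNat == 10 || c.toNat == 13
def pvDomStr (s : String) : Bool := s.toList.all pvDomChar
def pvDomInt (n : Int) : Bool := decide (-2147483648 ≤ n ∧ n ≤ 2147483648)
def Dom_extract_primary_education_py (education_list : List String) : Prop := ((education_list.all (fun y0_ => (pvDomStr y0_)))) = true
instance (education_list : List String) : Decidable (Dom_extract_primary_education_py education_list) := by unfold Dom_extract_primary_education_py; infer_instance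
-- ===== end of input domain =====

-- B restructures A's hierarchy-outer nested loop with early return into one pass over
-- education_list keeping a minimum hierarchy-rank accumulator (objective: alternative decomposition).

-- ===== PORT A =====
def pvHierA : List String :=
  ["Doctorate", "PhD", "Ph.D.", "Doctor of Philosophy",
   "Master", "Master's", "Master's degree",
   "Bachelor", "Bachelor's", "Bachelor's degree",
   "Associate", "Associate's", "Associate's degree",
   "High School", "High school", "High school diploma",
   "No Education Listed", "None"]

-- inner 'for edu in education_list: if level.lower() in edu.lower(): return level'
def pvInnerA (level : String) : List String → Bool
  | [] => false
  | edu :: rest =>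
    if PySem.Str.isIn (PySem.Str.lower level) (PySem.Str.lower edu) then true
    else pvInnerA level rest

-- outer 'for level in hierarchy: …' with early return
def pvOuterA (education_list : List String) : List String → Option String
  | [] => none
  | level :: rest =>
    if pvInnerA level education_list then some level
    else pvOuterA education_list rest

def extract_primary_education_py (education_list : List String) : String :=
  match education_list with
  | [] => "No Education Listed"
  | e0 :: rest =>
    match pvOuterA (e0 :: rest) pvHierA with
    | some level => level
    | none => e0      -- education_list[0]

-- ===== PORT B =====
def pvHierB : List String :=
  ["Doctorate", "PhD", "Ph.D.", "Doctor of Philosophy",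
   "Master", "Master's", "Master's degree",
   "Bachelor", "Bachelor's", "Bachelor's degree",
   "Associate", "Associate's", "Associate's degree",
   "High School", "High school", "High school diploma",
   "No Education Listed", "None"]

def extract_primary_education_py_alt (education_list : List String) : String :=
  match education_list with
  | [] => "No Education Listed"
  | e0 :: rest =>
    let lowered := pvHierB.map PySem.Str.lower
    let n := pvHierB.length
    -- 'next((i for i, lv in enumerate(lowered) if lv in e), n)' = findIdx (returns n = length when absent)
    let best := (e0 :: rest).foldl (fun best edu =>
      let e := PySem.Str.lower edu
      let r := lowered.findIdx (fun lv => PySem.Str.isIn lv e)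
      if r < best then r else best) n
    if best < n then pvHierB.getD best "" else e0

-- ===== PRECONDITION & SPEC =====
def Spec_extract_primary_education_py (education_list : List String) (out : String) : Prop := out = extract_primary_education_py_alt education_list
instance (education_list : List String) (out : String) : Decidable (Spec_extract_primary_education_py education_list out) := by unfold Spec_extract_primary_education_py; infer_instance

-- ===== CLAIM (what is proved, stated in full; the proofs are below) =====
def Claim_equal_extract_primary_education_py : Prop := ∀ (education_list : List String), Dom_extract_primary_education_py education_list → Spec_extract_primary_education_py education_list (extract_primary_education_py education_list)

-- ===== LEMMAS AND PROOFS =====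

-- A's inner loop is an 'any' over education_list
theorem pvInnerA_eq_any (level : String) (edus : List String) :
    pvInnerA level edus
      = edus.any (fun edu => PySem.Str.isIn (PySem.Str.lower level) (PySem.Str.lower edu)) := by
  induction edus with
  | nil => rfl
  | cons e r ih =>
    simp only [pvInnerA, List.any_cons]
    split_ifs with h
    · simp only [h, Bool.true_or]
    · rw [Bool.not_eq_true] at h
      rw [h, Bool.false_or, ih]

-- A's outer loop is find? over the hierarchy
theorem pvOuterA_eq_find? (edus hs : List String) :
    pvOuterA edus hs
      = hs.find? (fun level => edus.any
          (fun edu => PySem.Str.isIn (PySem.Str.lower level) (PySem.Str.lower edu))) := by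
  induction hs with
  | nil => rfl
  | cons l r ih =>
    simp only [pvOuterA, pvInnerA_eq_any]
    by_cases h : (edus.any fun edu => PySem.Str.isIn (PySem.Str.lower l) (PySem.Str.lower edu)) = true
    · rw [if_pos h, List.find?_cons_of_pos
        (p := fun level => edus.any fun edu => PySem.Str.isIn (PySem.Str.lower level) (PySem.Str.lower edu)) h]
    · rw [if_neg h, ih, List.find?_cons_of_neg
        (p := fun level => edus.any fun edu => PySem.Str.isIn (PySem.Str.lower level) (PySem.Str.lower edu)) h]

-- findIdx of a disjunction is the min of the findIdx's
theorem pvFindIdx_or (q1 q2 : String → Bool) (hs : List String) :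
    hs.findIdx (fun x => q1 x || q2 x) = min (hs.findIdx q1) (hs.findIdx q2) := by
  induction hs with
  | nil => rfl
  | cons a t ih =>
    simp only [List.findIdx_cons, ih]
    cases h1 : q1 a <;> cases h2 : q2 a <;> simp

-- findIdx of the always-false predicate is the length
theorem pvFindIdx_false (hs : List String) :
    hs.findIdx (fun _ : String => false) = hs.length := by
  induction hs with
  | nil => rfl
  | cons a t ih => simp [List.findIdx_cons, ih]

-- B's fold computes min init (findIdx of the 'matched by some edu' predicate)
theorem pvFold_eq_min (hs : List String) (edus : List String) (init : ℕ)
    (hinit : init ≤ hs.length) :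
    edus.foldl (fun best edu =>
        if hs.findIdx (fun level => PySem.Str.isIn (PySem.Str.lower level) (PySem.Str.lower edu)) < best
        then hs.findIdx (fun level => PySem.Str.isIn (PySem.Str.lower level) (PySem.Str.lower edu))
        else best) init
      = min init (hs.findIdx (fun level => edus.any
          (fun edu => PySem.Str.isIn (PySem.Str.lower level) (PySem.Str.lower edu)))) := by
  induction edus generalizing init with
  | nil =>
    simp only [List.foldl_nil, List.any_nil, pvFindIdx_false]
    omega
  | cons e r ih =>
    simp only [List.foldl_cons, List.any_cons]
    rw [pvFindIdx_or (fun level => PySem.Str.isIn (PySem.Str.lower level) (PySem.Str.lower e))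
          (fun level => r.any (fun edu => PySem.Str.isIn (PySem.Str.lower level) (PySem.Str.lower edu))) hs]
    have hr := List.findIdx_le_length
      (p := fun level => PySem.Str.isIn (PySem.Str.lower level) (PySem.Str.lower e)) (xs := hs)
    rw [ih _ (by split_ifs <;> omega)]
    split_ifs with h <;> omega

-- findIdx over the lowered hierarchy = findIdx with the lowering inside the predicate
theorem pvFindIdx_map (hs : List String) (e : String) :
    (hs.map PySem.Str.lower).findIdx (fun lv => PySem.Str.isIn lv e)
      = hs.findIdx (fun level => PySem.Str.isIn (PySem.Str.lower level) e) := by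
  rw [List.findIdx_map]
  congr 1

-- find? expressed through findIdx and getD
theorem pvFind?_eq (hs : List String) (q : String → Bool) (d : String) :
    hs.find? q = if hs.findIdx q < hs.length then some (hs.getD (hs.findIdx q) d) else none := by
  induction hs with
  | nil => rfl
  | cons a t ih =>
    by_cases h : q a = true
    · rw [List.find?_cons_of_pos (p := q) h]
      simp [List.findIdx_cons, h, List.getD]
    · rw [List.find?_cons_of_neg (p := q) h, ih]
      have hc : (a :: t).findIdx q = t.findIdx q + 1 := by simp [List.findIdx_cons, h]
      rw [hc]
      by_cases h1 : t.findIdx q < t.length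
      · rw [if_pos h1, if_pos (by simp only [List.length_cons]; omega)]
        rw [List.getD_cons_succ]
      · rw [if_neg h1, if_neg (by simp only [List.length_cons]; omega)]

-- ===== VERDICT (by name: the statement is the Claim_ definition above) =====
theorem extract_primary_education_py_spec : Claim_equal_extract_primary_education_py := by
  intro edus _
  unfold Spec_extract_primary_education_py
  match edus with
  | [] => rfl
  | e0 :: rest =>
    have hh : pvHierB = pvHierA := rfl
    simp only [extract_primary_education_py, extract_primary_education_py_alt, hh,
      pvFindIdx_map]
    rw [pvFold_eq_min pvHierA (e0 :: rest) pvHierA.length le_rfl]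
    rw [pvOuterA_eq_find?, pvFind?_eq pvHierA _ ""]
    have hle := List.findIdx_le_length (p := fun level => (e0 :: rest).any
      (fun edu => PySem.Str.isIn (PySem.Str.lower level) (PySem.Str.lower edu))) (xs := pvHierA)
    rw [min_eq_right hle]
    split_ifs <;> rfl
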